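-- pv_equiv track=rewrite | github.com/paspartu22/aoc2023 | day13/main.py | check_horisontal
-- ===== SOURCE A (Python) =====
-- def check_horisontal(mirror):
--     result = []
--     #log(mirror)
--     for placement in range(1,len(mirror)):
--         left = placement
--         right = len(mirror) - placement
--         compare_size = min(left, right)
--         left_side = mirror[placement - compare_size : placement]
--         right_side_m = mirror[placement + compare_size - 1 : placement - 1 : -1]
--         #log(f"size {compare_size}")
--         #log(f"left side  {left_side}")
--         #log(f"right side {right_side_m}")
--         #log()
--         if left_side == right_side_m:
--             result.append(placement)
--
--     return result if result else [0]
-- ===== SOURCE B (Python) =====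
-- def check_horisontal(mirror):
--     # Two-pointer expansion around each boundary instead of building and
--     # comparing slices: expand outward while rows match; the boundary is a
--     # mirror line iff the expansion runs off an edge of the grid.
--     n = len(mirror)
--     result = []
--     for p in range(1, n):
--         i, j = p - 1, p
--         while i >= 0 and j < n and mirror[i] == mirror[j]:
--             i -= 1
--             j += 1
--         if i < 0 or j >= n:
--             result.append(p)
--     return result if result else [0]
-- ===== Notes on version B (the rewrite author's own statement) =====
-- stated objective: alternative
-- what changed: Replaces per-boundary slice construction (two slices, one with negative step) and whole-list comparison with a two-pointer expansion around each boundary that stops at the first mismatching row pair and accepts the boundary iff an edge was reached; no speed is claimed (A's C-level slice comparison can beat B's interpreted loop on grids with many equal rows).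
import Mathlib
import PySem

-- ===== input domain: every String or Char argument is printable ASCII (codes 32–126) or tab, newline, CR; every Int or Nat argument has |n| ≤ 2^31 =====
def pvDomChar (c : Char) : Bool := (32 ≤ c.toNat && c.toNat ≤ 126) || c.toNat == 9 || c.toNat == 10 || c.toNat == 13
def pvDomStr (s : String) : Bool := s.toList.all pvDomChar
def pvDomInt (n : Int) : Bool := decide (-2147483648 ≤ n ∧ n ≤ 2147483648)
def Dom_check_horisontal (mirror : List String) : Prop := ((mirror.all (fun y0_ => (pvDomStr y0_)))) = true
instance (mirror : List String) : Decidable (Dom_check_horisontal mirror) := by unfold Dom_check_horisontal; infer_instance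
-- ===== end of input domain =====

-- B replaces A's per-boundary slice building (one slice with negative step) and list
-- comparison by a two-pointer expansion around each boundary that stops at the first
-- mismatching row pair; an alternative decomposition, no speed claimed (CPython's
-- C-level slice comparison can beat B's interpreted loop on mismatch-free grids).
-- ===== PORT A =====
def check_horisontal (mirror : List String) : List Int :=
  let result : List Int := []
  let result := (PySem.List.pyRange 1 (PySem.List.len mirror) 1).foldl
    (fun result placement =>
      let left := placement
      let right := PySem.List.len mirror - placement
      let compare_size := min left right
      let left_side := PySem.List.slice mirror (some (placement - compare_size)) (some placement)
      let right_side_m := (PySem.List.slice? mirror (some (placement + compare_size - 1)) (some (placement - 1)) (-1)).getD []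
      if left_side = right_side_m then result ++ [placement] else result) result
  if result = [] then [0] else result

-- ===== PORT B =====
-- two-pointer expansion around the boundary between rows i and j ('while i >= 0 and j < n and mirror[i] == mirror[j]')
def chExpand (mirror : List String) (i j : Int) : Int × Int :=
  if 0 ≤ i ∧ j < PySem.List.len mirror ∧ PySem.List.pyGet? mirror i = PySem.List.pyGet? mirror j then
    chExpand mirror (i - 1) (j + 1)
  else (i, j)
termination_by (PySem.List.len mirror - j).toNat
decreasing_by simp only [PySem.List.len_eq] at *; omega

def check_horisontal_alt (mirror : List String) : List Int :=
  let n := PySem.List.len mirror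
  let result := (PySem.List.pyRange 1 n 1).foldl
    (fun result p =>
      let ij := chExpand mirror (p - 1) p
      if ij.1 < 0 ∨ n ≤ ij.2 then result ++ [p] else result) ([] : List Int)
  if result = [] then [0] else result

-- ===== PRECONDITION & SPEC =====
def Spec_check_horisontal (mirror : List String) (out : List Int) : Prop := out = check_horisontal_alt mirror
instance (mirror : List String) (out : List Int) : Decidable (Spec_check_horisontal mirror out) := by unfold Spec_check_horisontal; infer_instance

-- ===== CLAIM (what is proved, stated in full; the proofs are below) =====
def Claim_equal_check_horisontal : Prop := ∀ (mirror : List String), Dom_check_horisontal mirror → Spec_check_horisontal mirror (check_horisontal mirror)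

-- ===== LEMMAS AND PROOFS =====

-- the filterMap inside a step -1 slice is the reverse of a drop/take window
lemma pv_filterMap_range_rev {A : Type} (xs : List A) (a c : Nat) (hc : c ≤ a + 1) (ha : a < xs.length) :
    List.filterMap (fun k : Nat => xs[((a : Int) + (-1) * (k : Int)).toNat]?) (List.range c)
      = ((xs.drop (a + 1 - c)).take c).reverse := by
  induction c with
  | zero => simp
  | succ c ih =>
    rw [List.range_succ, List.filterMap_append, ih (by omega)]
    have hidx : ((a : Int) + (-1) * (c : Int)).toNat = a - c := by omega
    have hlt : a - c < xs.length := by omega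
    have hdrop : xs.drop (a - c) = xs[a - c] :: xs.drop (a - c + 1) := List.drop_eq_getElem_cons hlt
    have h1 : a + 1 - (c + 1) = a - c := by omega
    have h2 : a + 1 - c = a - c + 1 := by omega
    rw [h1, h2, hdrop, List.take_succ_cons, List.reverse_cons]
    congr 1
    simp only [List.filterMap_cons, List.filterMap_nil, hidx, List.getElem?_eq_getElem hlt]

-- xs[a:b:-1] for Nat bounds b <= a < len
lemma pv_slice_neg_one {A : Type} (xs : List A) (a b : Nat) (hba : b ≤ a) (ha : a < xs.length) :
    PySem.List.slice? xs (some (a : Int)) (some (b : Int)) (-1)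
      = some (((xs.drop (b + 1)).take (a - b)).reverse) := by
  simp only [PySem.List.slice?, PySem.List.sliceIndices]
  have h1 : ¬ ((a:Int) < 0) := by omega
  have h2 : ¬ ((b:Int) < 0) := by omega
  have h3 : min (a:Int) ((xs.length:Int) - 1) = a := by omega
  have h4 : min (b:Int) ((xs.length:Int) - 1) = b := by omega
  norm_num [h1, h2, h3, h4]
  split_ifs with h5
  · have h6 : a + 1 - (a - b) = b + 1 := by omega
    have := pv_filterMap_range_rev xs a (a - b) (by omega) ha
    rw [h6] at this
    simpa using this
  · have h6 : a - b = 0 := by omega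
    simp [h6]

-- A's slice comparison says exactly: all m row pairs around the boundary q match
lemma pv_condA_iff (xs : List String) (q m : Nat) (hm : m ≤ q) (hqm : q + m ≤ xs.length) :
    ((xs.drop (q - m)).take m = ((xs.drop q).take m).reverse)
      ↔ ∀ t : Nat, t < m → xs[q - 1 - t]? = xs[q + t]? := by
  have hlen1 : ((xs.drop (q - m)).take m).length = m := by simp; omega
  have hlen2 : (((xs.drop q).take m).reverse).length = m := by simp; omega
  have hL : ∀ i, i < m → ((xs.drop (q - m)).take m)[i]? = xs[q - m + i]? := by
    intro i hi
    rw [List.getElem?_take_of_lt hi, List.getElem?_drop]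
  have hlen3 : ((xs.drop q).take m).length = m := by simp; omega
  have hR : ∀ i, i < m → (((xs.drop q).take m).reverse)[i]? = xs[q + (m - 1 - i)]? := by
    intro i hi
    rw [List.getElem?_reverse (by omega : i < ((xs.drop q).take m).length), hlen3,
        List.getElem?_take_of_lt (by omega), List.getElem?_drop]
  constructor
  · intro heq t ht
    have := congrArg (fun l => l[m - 1 - t]?) heq
    simp only at this
    rw [hL _ (by omega), hR _ (by omega)] at this
    have e1 : q - m + (m - 1 - t) = q - 1 - t := by omega
    have e2 : q + (m - 1 - (m - 1 - t)) = q + t := by omega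
    rw [e1, e2] at this
    exact this
  · intro h
    apply List.ext_getElem?
    intro i
    by_cases hi : i < m
    · rw [hL _ hi, hR _ hi]
      have e1 : q - m + i = q - 1 - (m - 1 - i) := by omega
      rw [e1]
      exact h _ (by omega)
    · rw [List.getElem?_eq_none (by omega), List.getElem?_eq_none (by omega)]

-- B's expansion runs off an edge iff all in-range row pairs around (i, j) match
lemma pv_expand_iff (xs : List String) (i j : Int) :
    ((chExpand xs i j).1 < 0 ∨ PySem.List.len xs ≤ (chExpand xs i j).2)
      ↔ ∀ t : Int, 0 ≤ t → t ≤ i → j + t < PySem.List.len xs →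
          PySem.List.pyGet? xs (i - t) = PySem.List.pyGet? xs (j + t) := by
  induction i, j using chExpand.induct xs with
  | case1 i j h ih =>
    rw [chExpand, if_pos h]
    rw [ih]
    constructor
    · intro hrec t ht0 hti htj
      rcases eq_or_lt_of_le ht0 with h0 | h0
      · subst h0
        simpa using h.2.2
      · have := hrec (t - 1) (by omega) (by omega) (by omega)
        rw [(by ring : i - 1 - (t - 1) = i - t), (by ring : j + 1 + (t - 1) = j + t)] at this
        exact this
    · intro horig t ht0 hti htj
      have := horig (t + 1) (by omega) (by omega) (by omega)
      rw [(by ring : i - (t + 1) = i - 1 - t), (by ring : j + (t + 1) = j + 1 + t)] at this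
      exact this
  | case2 i j h =>
    rw [chExpand, if_neg h]
    simp only []
    by_cases hi : i < 0
    · constructor
      · intro _ t ht0 hti htj
        omega
      · intro _
        exact Or.inl hi
    · by_cases hj : PySem.List.len xs ≤ j
      · constructor
        · intro _ t ht0 hti htj
          omega
        · intro _
          exact Or.inr hj
      · have hne : PySem.List.pyGet? xs i ≠ PySem.List.pyGet? xs j := by
          intro he
          exact h ⟨by omega, by omega, he⟩
        constructor
        · intro habs
          rcases habs with h1 | h2 <;> omega
        · intro horig
          exfalso
          apply hne
          have := horig 0 le_rfl (by omega) (by omega)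
          simpa using this

-- per-placement agreement of the two tests
lemma pv_cond_iff (xs : List String) (p : Int) (h1 : 1 ≤ p) (h2 : p < xs.length) :
    (PySem.List.slice xs (some (p - min p (PySem.List.len xs - p))) (some p)
       = (PySem.List.slice? xs (some (p + min p (PySem.List.len xs - p) - 1)) (some (p - 1)) (-1)).getD [])
      ↔ ((chExpand xs (p - 1) p).1 < 0 ∨ PySem.List.len xs ≤ (chExpand xs (p - 1) p).2) := by
  obtain ⟨q, rfl⟩ : ∃ q : Nat, p = (q : Int) := ⟨p.toNat, by omega⟩
  have hq1 : 1 ≤ q := by omega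
  have hqn : q < xs.length := by omega
  have hlen : PySem.List.len xs = (xs.length : Int) := PySem.List.len_eq xs
  have hkm : min (q : Int) (PySem.List.len xs - q) = ((min q (xs.length - q) : Nat) : Int) := by
    rw [hlen, Nat.cast_min]
    have : ((xs.length - q : Nat) : Int) = (xs.length : Int) - q := by omega
    rw [this]
  rw [hkm]
  have hm1 : 1 ≤ min q (xs.length - q) := by omega
  have hmq : min q (xs.length - q) ≤ q := by omega
  have hqm : q + min q (xs.length - q) ≤ xs.length := by omega
  generalize hM : min q (xs.length - q) = m at hm1 hmq hqm ⊢
  have hslice : PySem.List.slice xs (some ((q : Int) - (m : Nat))) (some (q : Int))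
      = (xs.drop (q - m)).take m := by
    have d1 : ((q : Int) - ((m : Nat) : Int)).toNat = q - m := by omega
    have d2 : ((q : Int)).toNat - (q - m) = m := by omega
    rw [PySem.List.slice_toNat xs (by omega) (by omega), d1, d2]
  have hslice2 : (PySem.List.slice? xs (some ((q : Int) + (m : Nat) - 1)) (some ((q : Int) - 1)) (-1)).getD []
      = ((xs.drop q).take m).reverse := by
    have e1 : (q : Int) + ((m : Nat) : Int) - 1 = ((q + m - 1 : Nat) : Int) := by omega
    have e2 : (q : Int) - 1 = ((q - 1 : Nat) : Int) := by omega
    rw [e1, e2, pv_slice_neg_one xs _ _ (by omega) (by omega)]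
    have e3 : q - 1 + 1 = q := by omega
    have e4 : q + m - 1 - (q - 1) = m := by omega
    rw [e3, e4]
    rfl
  rw [hslice, hslice2, pv_condA_iff xs q m hmq hqm, pv_expand_iff]
  constructor
  · intro h t ht0 hti htj
    have hidx1 : (q : Int) - 1 - t = ((q - 1 - t.toNat : Nat) : Int) := by omega
    have hidx2 : (q : Int) + t = ((q + t.toNat : Nat) : Int) := by omega
    rw [hidx1, hidx2, PySem.List.pyGet?_natCast, PySem.List.pyGet?_natCast]
    exact h t.toNat (by rw [hlen] at htj; omega)
  · intro h t ht
    have := h (t : Int) (by omega) (by omega) (by rw [hlen]; omega)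
    have hidx1 : (q : Int) - 1 - (t : Int) = ((q - 1 - t : Nat) : Int) := by omega
    have hidx2 : (q : Int) + (t : Int) = ((q + t : Nat) : Int) := by omega
    rw [hidx1, hidx2, PySem.List.pyGet?_natCast, PySem.List.pyGet?_natCast] at this
    exact this

-- ===== VERDICT (by name: the statement is the Claim_ definition above) =====
theorem check_horisontal_spec : Claim_equal_check_horisontal := by
  intro mirror _
  unfold Spec_check_horisontal check_horisontal check_horisontal_alt
  have hfold : ∀ (init : List Int),
      (PySem.List.pyRange 1 (PySem.List.len mirror) 1).foldl
        (fun result placement =>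
          if PySem.List.slice mirror (some (placement - min placement (PySem.List.len mirror - placement))) (some placement)
             = (PySem.List.slice? mirror (some (placement + min placement (PySem.List.len mirror - placement) - 1)) (some (placement - 1)) (-1)).getD []
          then result ++ [placement] else result) init
      = (PySem.List.pyRange 1 (PySem.List.len mirror) 1).foldl
        (fun result p =>
          if (chExpand mirror (p - 1) p).1 < 0 ∨ PySem.List.len mirror ≤ (chExpand mirror (p - 1) p).2
          then result ++ [p] else result) init := by
    intro init
    apply PySem.List.foldl_congr_mem
    intro acc p hp
    rw [PySem.List.mem_pyRange_one] at hp
    have hcond := pv_cond_iff mirror p hp.1 (by simpa [PySem.List.len_eq] using hp.2)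
    by_cases h : (chExpand mirror (p - 1) p).1 < 0 ∨ PySem.List.len mirror ≤ (chExpand mirror (p - 1) p).2
    · rw [if_pos (hcond.mpr h), if_pos h]
    · rw [if_neg (fun hc => h (hcond.mp hc)), if_neg h]
  simp only []
  rw [hfold]
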